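-- pv_equiv track=rewrite | github.com/rdvnkdyf/Hackerrank-practice-skills | ai/MorphologicalOperationsDilation.py | dilate_image
-- ===== SOURCE A (Python) =====
-- def dilate_image(image):
--     rows = len(image)
--     if not rows:
--         return 0
--     cols = len(image[0])
--
--     dilated_image = [[0] * cols for _ in range(rows)]
--
--     for r in range(rows):
--         for c in range(cols):
--             if image[r][c] == 1:
--                 for i in range(-1, 2):
--                     for j in range(-1, 2):
--                         new_r, new_c = r + i, c + j
--                         if 0 <= new_r < rows and 0 <= new_c < cols:
--                             dilated_image[new_r][new_c] = 1
--
--     pixel_count = sum(row.count(1) for row in dilated_image)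
--
--     return pixel_count
-- ===== SOURCE B (Python) =====
-- def dilate_image(image):
--     if not image:
--         return 0
--     rows, cols = len(image), len(image[0])
--     return sum(
--         1
--         for r in range(rows)
--         for c in range(cols)
--         if any(image[rr][cc] == 1
--                for rr in range(max(r - 1, 0), min(r + 2, rows))
--                for cc in range(max(c - 1, 0), min(c + 2, cols)))
--     )
-- ===== Notes on version B (the rewrite author's own statement) =====
-- stated objective: simpler
-- what changed: A scatters: it materializes a full rows x cols dilated grid, writing 1 into every in-bounds neighbour of each foreground pixel, then counts the 1s; B gathers: it directly counts the pixels whose clamped 3x3 window contains a 1, never building any intermediate grid.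
-- outside the precondition, e.g. on dilate_image([[0, 0], [0]]): A raises IndexError, B raises IndexError
import Mathlib
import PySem

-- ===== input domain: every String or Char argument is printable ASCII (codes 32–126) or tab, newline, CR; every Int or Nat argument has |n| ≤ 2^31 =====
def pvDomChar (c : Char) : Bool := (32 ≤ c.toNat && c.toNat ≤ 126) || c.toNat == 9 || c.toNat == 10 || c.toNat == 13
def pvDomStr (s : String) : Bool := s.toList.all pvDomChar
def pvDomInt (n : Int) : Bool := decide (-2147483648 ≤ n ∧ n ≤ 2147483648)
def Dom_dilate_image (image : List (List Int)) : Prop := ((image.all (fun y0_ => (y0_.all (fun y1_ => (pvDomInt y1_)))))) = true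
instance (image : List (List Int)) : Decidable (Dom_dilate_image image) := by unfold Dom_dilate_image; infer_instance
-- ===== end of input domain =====

-- B replaces A's scatter (materializing a full dilated grid and counting its 1s) by a direct
-- gather count: each pixel is counted iff its clamped 3x3 window contains a 1 (objective: simpler).

-- ===== PORT A =====
def dilate_image (image : List (List Int)) : Int :=
  let rows := image.length
  if rows = 0 then 0 else
  let cols := image.headI.length
  let init : List (List Int) := (List.range rows).map (fun _ => List.replicate cols (0 : Int))
  let final := (List.range rows).foldl (fun g r =>
    (List.range cols).foldl (fun g c =>
      if (image.getD r []).getD c 0 = 1 then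
        (PySem.List.pyRange (-1) 2 1).foldl (fun g i =>
          (PySem.List.pyRange (-1) 2 1).foldl (fun g j =>
            let nr : Int := (r : Int) + i
            let nc : Int := (c : Int) + j
            if 0 ≤ nr ∧ nr < (rows : Int) ∧ 0 ≤ nc ∧ nc < (cols : Int) then
              g.modify nr.toNat (fun row => row.set nc.toNat 1)
            else g) g) g
      else g) g) init
  (((final.map (fun row => row.count 1)).sum : Nat) : Int)

-- ===== PORT B =====
def dilate_image_alt (image : List (List Int)) : Int :=
  if image = [] then 0 else
  let rows := image.length
  let cols := image.headI.length
  ((((List.range rows).foldl (fun acc r =>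
      acc + ((List.range cols).countP (fun c =>
        (List.range' (r - 1) (min (r + 2) rows - (r - 1))).any (fun rr =>
          (List.range' (c - 1) (min (c + 2) cols - (c - 1))).any (fun cc =>
            (image.getD rr []).getD cc 0 == 1))))) 0) : Nat) : Int)

-- ===== PRECONDITION & SPEC =====
-- Pre_ excludes ragged images whose first row is longer than some later row: there A raises IndexError.
def Pre_dilate_image (image : List (List Int)) : Prop :=
  ∀ row ∈ image, image.headI.length ≤ row.length
instance (image : List (List Int)) : Decidable (Pre_dilate_image image) := by
  unfold Pre_dilate_image; infer_instance

def pvWitness_dilate_image : List (List Int) := [[1, 0], [0, 0]]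

def Spec_dilate_image (image : List (List Int)) (out : Int) : Prop := out = dilate_image_alt image
instance (image : List (List Int)) (out : Int) : Decidable (Spec_dilate_image image out) := by
  unfold Spec_dilate_image; infer_instance

-- ===== CLAIM (what is proved, stated in full; the proofs are below) =====
def Claim_equal_dilate_image : Prop := ∀ (image : List (List Int)), Dom_dilate_image image → Pre_dilate_image image → Spec_dilate_image image (dilate_image image)

-- ===== LEMMAS AND PROOFS =====

-- a single bounds-checked write of a 1 into the grid
def pvStep (rows cols : Nat) (g : List (List Int)) (p : Int × Int) : List (List Int) :=
  if 0 ≤ p.1 ∧ p.1 < (rows : Int) ∧ 0 ≤ p.2 ∧ p.2 < (cols : Int) then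
    g.modify p.1.toNat (fun row => row.set p.2.toNat 1)
  else g

-- the nine coordinates A writes for a foreground pixel (r, c)
def pvNine (r c : Nat) : List (Int × Int) :=
  (PySem.List.pyRange (-1) 2 1).flatMap (fun i =>
    (PySem.List.pyRange (-1) 2 1).map (fun j => ((r : Int) + i, (c : Int) + j)))

-- the full sequence of writes A performs
def pvWrites (image : List (List Int)) (rows cols : Nat) : List (Int × Int) :=
  (List.range rows).flatMap (fun r => (List.range cols).flatMap (fun c =>
    if (image.getD r []).getD c 0 = 1 then pvNine r c else []))

def pvCell (g : List (List Int)) (x y : Nat) : Int := (g.getD x []).getD y 0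

def pvShape (rows cols : Nat) (g : List (List Int)) : Prop :=
  g.length = rows ∧ ∀ (j : Nat) (row : List Int), g[j]? = some row → row.length = cols

-- (x, y) has a foreground pixel within Chebyshev distance 1
def pvNear (image : List (List Int)) (rows cols x y : Nat) : Bool :=
  (List.range rows).any (fun r => (List.range cols).any (fun c =>
    ((image.getD r []).getD c 0 == 1) && decide (x ≤ r + 1) && decide (r ≤ x + 1)
      && decide (y ≤ c + 1) && decide (c ≤ y + 1)))

theorem pv_pyRange_explicit : PySem.List.pyRange (-1) 2 1 = [-1, 0, 1] := by decide

theorem pv_loops_eq (image : List (List Int)) (rows cols : Nat) (g0 : List (List Int)) :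
    (List.range rows).foldl (fun g r =>
      (List.range cols).foldl (fun g c =>
        if (image.getD r []).getD c 0 = 1 then
          (PySem.List.pyRange (-1) 2 1).foldl (fun g i =>
            (PySem.List.pyRange (-1) 2 1).foldl (fun g j =>
              if 0 ≤ (r : Int) + i ∧ (r : Int) + i < (rows : Int)
                  ∧ 0 ≤ (c : Int) + j ∧ (c : Int) + j < (cols : Int) then
                g.modify ((r : Int) + i).toNat (fun row => row.set ((c : Int) + j).toNat 1)
              else g) g) g
        else g) g) g0
    = (pvWrites image rows cols).foldl (pvStep rows cols) g0 := by
  unfold pvWrites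
  rw [List.foldl_flatMap]
  congr 1
  funext g r
  rw [List.foldl_flatMap]
  congr 1
  funext g c
  by_cases hfg : (image.getD r []).getD c 0 = 1
  · rw [if_pos hfg, if_pos hfg]
    simp only [pvNine, List.foldl_flatMap, List.foldl_map]
    rfl
  · rw [if_neg hfg, if_neg hfg, List.foldl_nil]

theorem pv_shape_step (rows cols : Nat) (g : List (List Int)) (p : Int × Int)
    (h : pvShape rows cols g) : pvShape rows cols (pvStep rows cols g p) := by
  unfold pvStep
  split
  · refine ⟨by simpa [List.length_modify] using h.1, ?_⟩
    intro j row hrow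
    rw [List.getElem?_modify] at hrow
    cases hg : g[j]? with
    | none => simp [hg] at hrow
    | some a =>
      simp only [hg, Option.map_eq_map, Option.map_some] at hrow
      have ha := h.2 j a hg
      by_cases hij : p.1.toNat = j
      · simp only [hij, if_true] at hrow
        cases hrow
        simp [ha]
      · simp only [hij, if_false] at hrow
        cases hrow
        exact ha
  · exact h

theorem pv_shape_foldl (rows cols : Nat) (L : List (Int × Int)) (g : List (List Int))
    (h : pvShape rows cols g) : pvShape rows cols (L.foldl (pvStep rows cols) g) := by
  induction L generalizing g with
  | nil => exact h
  | cons p L ih => exact ih _ (pv_shape_step rows cols g p h)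

theorem pvCell_eq_opt (g : List (List Int)) (x y : Nat) :
    pvCell g x y = ((g[x]?.getD [])[y]?.getD 0) := by
  simp [pvCell, List.getD_eq_getElem?_getD]

theorem pvCell_eq_getElem (g : List (List Int)) (x y : Nat)
    (hx : x < g.length) (hy : y < g[x].length) : pvCell g x y = g[x][y] := by
  rw [pvCell_eq_opt, List.getElem?_eq_getElem hx]
  simp [List.getElem?_eq_getElem hy]

theorem pv_cell_step (rows cols : Nat) (g : List (List Int)) (p : Int × Int)
    (hsh : pvShape rows cols g) (x y : Nat) (hx : x < rows) (hy : y < cols) :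
    pvCell (pvStep rows cols g p) x y = if p = ((x : Int), (y : Int)) then 1 else pvCell g x y := by
  obtain ⟨p1, p2⟩ := p
  unfold pvStep
  split
  · rename_i hb
    obtain ⟨h1, h2, h3, h4⟩ := hb
    have hxg : x < g.length := by
      have := hsh.1
      omega
    obtain ⟨rowx, hrowx⟩ : ∃ rowx, g[x]? = some rowx :=
      ⟨g[x], List.getElem?_eq_getElem hxg⟩
    have hlenx : rowx.length = cols := hsh.2 x rowx hrowx
    rw [pvCell_eq_opt, pvCell_eq_opt, List.getElem?_modify, hrowx]
    by_cases hpx : p1.toNat = x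
    · simp only [hpx, if_true, Option.map_eq_map, Option.map_some, Option.getD_some]
      by_cases hpy : p2.toNat = y
      · have e1 : p1 = (x : Int) := by
          have h := Int.toNat_of_nonneg h1
          rw [hpx] at h
          exact h.symm
        have e2 : p2 = (y : Int) := by
          have h := Int.toNat_of_nonneg h3
          rw [hpy] at h
          exact h.symm
        have hpeq : ((p1, p2) : Int × Int) = ((x : Int), (y : Int)) := by
          rw [Prod.mk.injEq]
          exact ⟨e1, e2⟩
        rw [if_pos hpeq, List.getElem?_set]
        simp [hpy, hlenx, hy]
      · have hpne : ((p1, p2) : Int × Int) ≠ ((x : Int), (y : Int)) := by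
          rw [Ne, Prod.mk.injEq]
          rintro ⟨-, h⟩
          apply hpy
          rw [h]
          simp
        rw [if_neg hpne, List.getElem?_set]
        simp [hpy]
    · have hpne : ((p1, p2) : Int × Int) ≠ ((x : Int), (y : Int)) := by
        rw [Ne, Prod.mk.injEq]
        rintro ⟨h, -⟩
        apply hpx
        rw [h]
        simp
      simp only [hpx, if_false, Option.map_eq_map, Option.map_some, Option.getD_some, hpne]
  · rename_i hb
    have hpne : ((p1, p2) : Int × Int) ≠ ((x : Int), (y : Int)) := by
      rw [Ne, Prod.mk.injEq]
      rintro ⟨rfl, rfl⟩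
      exact hb ⟨by omega, by omega, by omega, by omega⟩
    simp [hpne]

theorem pv_cell_foldl (rows cols : Nat) (L : List (Int × Int)) (g : List (List Int))
    (hsh : pvShape rows cols g) (x y : Nat) (hx : x < rows) (hy : y < cols) :
    pvCell (L.foldl (pvStep rows cols) g) x y
      = if ((x : Int), (y : Int)) ∈ L then 1 else pvCell g x y := by
  induction L generalizing g with
  | nil => simp
  | cons p L ih =>
    rw [List.foldl_cons, ih _ (pv_shape_step rows cols g p hsh)]
    rw [pv_cell_step rows cols g p hsh x y hx hy]
    by_cases hmem : ((x : Int), (y : Int)) ∈ L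
    · simp [hmem, List.mem_cons]
    · by_cases hp : p = ((x : Int), (y : Int))
      · simp [hmem, hp, List.mem_cons]
      · have hps : ((x : Int), (y : Int)) ≠ p := fun hc => hp hc.symm
        simp [hmem, hp, hps, List.mem_cons]

theorem pv_mem_nine (r c x y : Nat) :
    (((x : Int), (y : Int)) ∈ pvNine r c) ↔ (x ≤ r + 1 ∧ r ≤ x + 1 ∧ y ≤ c + 1 ∧ c ≤ y + 1) := by
  simp only [pvNine, pv_pyRange_explicit, List.mem_flatMap, List.mem_map]
  constructor
  · rintro ⟨i, hi, j, hj, hij⟩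
    have h1 : (x : Int) = (r : Int) + i := by
      have := congrArg Prod.fst hij
      simpa using this.symm
    have h2 : (y : Int) = (c : Int) + j := by
      have := congrArg Prod.snd hij
      simpa using this.symm
    simp only [List.mem_cons, List.not_mem_nil, or_false] at hi hj
    refine ⟨?_, ?_, ?_, ?_⟩ <;> rcases hi with hi | hi | hi <;> rcases hj with hj | hj | hj <;>
      omega
  · rintro ⟨h1, h2, h3, h4⟩
    refine ⟨(x : Int) - (r : Int), by simp; omega, (y : Int) - (c : Int), by simp; omega, ?_⟩
    refine Prod.ext (by simp) (by simp)

theorem pv_mem_writes (image : List (List Int)) (rows cols x y : Nat) :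
    (((x : Int), (y : Int)) ∈ pvWrites image rows cols) ↔ pvNear image rows cols x y = true := by
  simp only [pvWrites, pvNear, List.mem_flatMap, List.mem_range, List.any_eq_true,
    Bool.and_eq_true, beq_iff_eq, decide_eq_true_eq]
  constructor
  · rintro ⟨r, hr, c, hc, hm⟩
    by_cases hfg : (image.getD r []).getD c 0 = 1
    · rw [if_pos hfg] at hm
      have := (pv_mem_nine r c x y).mp hm
      exact ⟨r, hr, c, hc, ⟨⟨⟨⟨hfg, this.1⟩, this.2.1⟩, this.2.2.1⟩, this.2.2.2⟩⟩
    · rw [if_neg hfg] at hm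
      simp at hm
  · rintro ⟨r, hr, c, hc, ⟨⟨⟨⟨hfg, h1⟩, h2⟩, h3⟩, h4⟩⟩
    exact ⟨r, hr, c, hc, by rw [if_pos hfg]; exact (pv_mem_nine r c x y).mpr ⟨h1, h2, h3, h4⟩⟩

theorem pv_shape_init (rows cols : Nat) :
    pvShape rows cols ((List.range rows).map (fun _ => List.replicate cols (0 : Int))) := by
  refine ⟨by simp, ?_⟩
  intro j row hrow
  rw [List.getElem?_map] at hrow
  cases h : (List.range rows)[j]? with
  | none => simp [h] at hrow
  | some a =>
    simp only [h, Option.map_some] at hrow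
    cases hrow
    simp

theorem pv_cell_init (rows cols x y : Nat) :
    pvCell ((List.range rows).map (fun _ => List.replicate cols (0 : Int))) x y = 0 := by
  rw [pvCell_eq_opt]
  by_cases hx : x < rows
  · rw [List.getElem?_map, List.getElem?_range hx]
    simp only [Option.map_some, Option.getD_some, List.getElem?_replicate]
    by_cases hy : y < cols <;> simp [hy]
  · have hnone : ((List.range rows).map (fun _ => List.replicate cols (0 : Int)))[x]? = none := by
      rw [List.getElem?_eq_none_iff]
      simpa using Nat.le_of_not_lt hx
    rw [hnone]
    simp

theorem pv_final_eq (image : List (List Int)) (rows cols : Nat) :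
    (pvWrites image rows cols).foldl (pvStep rows cols)
        ((List.range rows).map (fun _ => List.replicate cols (0 : Int)))
      = (List.range rows).map (fun x => (List.range cols).map (fun y =>
          if pvNear image rows cols x y then (1 : Int) else 0)) := by
  have hsh := pv_shape_foldl rows cols (pvWrites image rows cols) _ (pv_shape_init rows cols)
  apply List.ext_getElem
  · rw [hsh.1]
    simp
  · intro x hx1 hx2
    have hxr : x < rows := by
      have := hsh.1
      omega
    have hrowx := List.getElem?_eq_getElem hx1
    have hlenx := hsh.2 x _ hrowx
    apply List.ext_getElem
    · rw [hlenx]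
      simp
    · intro y hy1 hy2
      have hyc : y < cols := by omega
      have hcell := pv_cell_foldl rows cols (pvWrites image rows cols) _
        (pv_shape_init rows cols) x y hxr hyc
      rw [pv_cell_init] at hcell
      rw [← pvCell_eq_getElem _ x y hx1 hy1, hcell]
      simp only [List.getElem_map, List.getElem_range]
      have hmw := pv_mem_writes image rows cols x y
      by_cases hn : pvNear image rows cols x y = true
      · rw [if_pos (hmw.mpr hn), if_pos hn]
      · rw [if_neg (fun h => hn (hmw.mp h)), if_neg hn]

theorem pv_pred_eq (image : List (List Int)) (rows cols r c : Nat)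
    (hr : r < rows) (hc : c < cols) :
    ((List.range' (r - 1) (min (r + 2) rows - (r - 1))).any (fun rr =>
        (List.range' (c - 1) (min (c + 2) cols - (c - 1))).any (fun cc =>
          (image.getD rr []).getD cc 0 == 1)))
      = pvNear image rows cols r c := by
  rw [Bool.eq_iff_iff]
  simp only [pvNear, List.any_eq_true, List.mem_range'_1, List.mem_range, Bool.and_eq_true,
    beq_iff_eq, decide_eq_true_eq]
  constructor
  · rintro ⟨rr, hrr, cc, hcc, hfg⟩
    exact ⟨rr, by omega, cc, by omega, ⟨⟨⟨⟨hfg, by omega⟩, by omega⟩, by omega⟩, by omega⟩⟩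
  · rintro ⟨rr, hrr, cc, hcc, ⟨⟨⟨⟨hfg, h1⟩, h2⟩, h3⟩, h4⟩⟩
    exact ⟨rr, by omega, cc, by omega, hfg⟩

-- sum-of-loop shape for B's outer fold
theorem pv_foldl_add (l : List Nat) (f : Nat → Nat) (init : Nat) :
    l.foldl (fun acc r => acc + f r) init = init + (l.map f).sum := by
  induction l generalizing init with
  | nil => simp
  | cons a l ih => simp [ih, Nat.add_assoc]

-- ===== VERDICT (by name: the statement is the Claim_ definition above) =====
theorem dilate_image_spec : Claim_equal_dilate_image := by
  intro image _ _
  unfold Spec_dilate_image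
  by_cases himg : image = []
  · subst himg
    simp [dilate_image, dilate_image_alt]
  · have hrows : image.length ≠ 0 := by simpa [List.length_eq_zero_iff] using himg
    simp only [dilate_image, dilate_image_alt]
    rw [if_neg hrows, if_neg himg]
    rw [pv_loops_eq image image.length image.headI.length, pv_final_eq]
    rw [pv_foldl_add]
    congr 1
    rw [Nat.zero_add, List.map_map]
    congr 1
    apply List.map_congr_left
    intro r hr
    rw [List.mem_range] at hr
    simp only [Function.comp]
    rw [List.count_eq_countP, List.countP_map]
    apply List.countP_congr
    intro c hc
    rw [List.mem_range] at hc
    simp only [Function.comp]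
    rw [← pv_pred_eq image image.length image.headI.length r c hr hc]
    by_cases hn : (List.range' (r - 1) (min (r + 2) image.length - (r - 1))).any (fun rr =>
        (List.range' (c - 1) (min (c + 2) image.headI.length - (c - 1))).any (fun cc =>
          (image.getD rr []).getD cc 0 == 1)) = true
    · rw [if_pos hn, hn]
      decide
    · rw [if_neg hn]
      rw [Bool.eq_false_iff.mpr hn]
      decide
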